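-- pv_equiv track=rewrite | github.com/skorokithakis/esphome-configs | compensate_rgb332.py | compensate_pixel
-- ===== SOURCE A (Python) =====
-- def compensate_pixel(r: int, g: int, b: int) -> tuple[int, int, int]:
--     """
--     Adjust pixel color to compensate for RGB332 quantization.
--
--     The goal is to find input values that, after RGB332 quantization,
--     produce colors as close as possible to the original intended color.
--     """
--     # RGB332 quantization levels.
--     r_levels = [i * 255 // 7 for i in range(8)]  # 0, 36, 73, 109, 146, 182, 219, 255
--     g_levels = [i * 255 // 7 for i in range(8)]
--     b_levels = [i * 255 // 3 for i in range(4)]  # 0, 85, 170, 255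
--
--     def find_best_input(target: int, levels: list[int], bits: int) -> int:
--         """Find input value that quantizes closest to target."""
--         best_input = 0
--         best_diff = 256
--
--         # The quantization threshold for each level.
--         shift = 8 - bits
--         for test_input in range(256):
--             level_index = test_input >> shift
--             quantized = levels[level_index]
--             diff = abs(quantized - target)
--             if diff < best_diff:
--                 best_diff = diff
--                 best_input = test_input
--                 if diff == 0:
--                     break
--
--         return best_input
--
--     # Find input values that quantize closest to original colors.
--     r_comp = find_best_input(r, r_levels, 3)
--     g_comp = find_best_input(g, g_levels, 3)
--     b_comp = find_best_input(b, b_levels, 2)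
--
--     return (r_comp, g_comp, b_comp)
-- ===== SOURCE B (Python) =====
-- def compensate_pixel(r: int, g: int, b: int) -> tuple[int, int, int]:
--     """Adjust pixel color to compensate for RGB332 quantization.
--
--     Scans the distinct quantization levels (8 for r/g, 4 for b) instead of
--     all 256 candidate inputs; the smallest input mapping to the best level
--     is best_index << shift.
--     """
--
--     def find_best_input(target: int, bits: int) -> int:
--         n = (1 << bits) - 1
--         levels = [i * 255 // n for i in range(n + 1)]
--         shift = 8 - bits
--         best_index = 0
--         best_diff = 256
--         for idx, level in enumerate(levels):
--             d = abs(level - target)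
--             if d < best_diff:
--                 best_diff = d
--                 best_index = idx
--         return best_index << shift
--
--     return (find_best_input(r, 3), find_best_input(g, 3), find_best_input(b, 2))
-- ===== Notes on version B (the rewrite author's own statement) =====
-- stated objective: simpler
-- what changed: B scans only the distinct quantization levels (8 for r/g, 4 for b) instead of all 256 candidate inputs, tracking the best level index and mapping it back via index << shift; the early-break of A disappears because strict < already keeps the first minimum.
import Mathlib
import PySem

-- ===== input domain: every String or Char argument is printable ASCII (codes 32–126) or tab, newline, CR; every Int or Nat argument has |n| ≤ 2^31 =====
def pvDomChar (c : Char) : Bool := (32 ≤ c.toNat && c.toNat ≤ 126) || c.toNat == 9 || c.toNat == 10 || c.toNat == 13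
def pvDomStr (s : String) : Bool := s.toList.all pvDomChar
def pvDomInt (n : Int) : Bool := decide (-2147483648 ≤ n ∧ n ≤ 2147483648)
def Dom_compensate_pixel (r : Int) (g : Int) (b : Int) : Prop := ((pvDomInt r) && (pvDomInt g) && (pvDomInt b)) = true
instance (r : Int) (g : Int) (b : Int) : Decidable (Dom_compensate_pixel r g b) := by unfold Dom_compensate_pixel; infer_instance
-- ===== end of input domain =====

-- B scans only the distinct quantization levels instead of all 256 candidate inputs (simpler loop, same result on every input).

-- ===== PORT A =====
-- state = (best_input, best_diff, broke) ; the Bool models Python's `break` on diff == 0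
def pvStepA (target : Int) (levels : List Int) (shift : Nat)
    (s : Int × Int × Bool) (test_input : Int) : Int × Int × Bool :=
  if s.2.2 then s
  else
    let level_index := test_input >>> shift
    let quantized := (PySem.List.pyGet? levels level_index).getD 0  -- index is always in range in A; getD is exact here
    let diff := |quantized - target|
    if diff < s.2.1 then (test_input, diff, decide (diff = 0)) else s

def pvFindBestInput (target : Int) (levels : List Int) (bits : Nat) : Int :=
  let shift := 8 - bits
  ((PySem.List.pyRange 0 256 1).foldl (pvStepA target levels shift) (0, 256, false)).1

def compensate_pixel (r : Int) (g : Int) (b : Int) : Int × Int × Int :=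
  let r_levels := (PySem.List.pyRange 0 8 1).map (fun i => PySem.Int.floordiv (i * 255) 7)
  let g_levels := (PySem.List.pyRange 0 8 1).map (fun i => PySem.Int.floordiv (i * 255) 7)
  let b_levels := (PySem.List.pyRange 0 4 1).map (fun i => PySem.Int.floordiv (i * 255) 3)
  (pvFindBestInput r r_levels 3, pvFindBestInput g g_levels 3, pvFindBestInput b b_levels 2)

-- ===== PORT B =====
-- state = (best_index, best_diff)
def pvStepB (target : Int) (s : Int × Int) (p : Int × Int) : Int × Int :=
  let d := |p.2 - target|
  if d < s.2 then (p.1, d) else s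

def pvFindBestInputAlt (target : Int) (bits : Nat) : Int :=
  let n : Int := (1 <<< bits) - 1
  let levels := (PySem.List.pyRange 0 (n + 1) 1).map (fun i => PySem.Int.floordiv (i * 255) n)
  let shift := 8 - bits
  ((PySem.List.enumerate levels 0).foldl (pvStepB target) (0, 256)).1 <<< shift

def compensate_pixel_alt (r : Int) (g : Int) (b : Int) : Int × Int × Int :=
  (pvFindBestInputAlt r 3, pvFindBestInputAlt g 3, pvFindBestInputAlt b 2)

-- ===== PRECONDITION & SPEC =====
def Spec_compensate_pixel (r : Int) (g : Int) (b : Int) (out : Int × Int × Int) : Prop := out = compensate_pixel_alt r g b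
instance (r : Int) (g : Int) (b : Int) (out : Int × Int × Int) : Decidable (Spec_compensate_pixel r g b out) := by unfold Spec_compensate_pixel; infer_instance

-- ===== CLAIM (what is proved, stated in full; the proofs are below) =====
def Claim_equal_compensate_pixel : Prop := ∀ (r : Int) (g : Int) (b : Int), Dom_compensate_pixel r g b → Spec_compensate_pixel r g b (compensate_pixel r g b)

-- ===== LEMMAS AND PROOFS =====

-- Once the break flag is set, or the common diff of the remaining inputs cannot beat best_diff, the fold is a no-op.
lemma pv_noop (t : Int) (L : List Int) (sh : Nat) (d0 : Int) :
    ∀ (l : List Int) (s : Int × Int × Bool),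
    (∀ x ∈ l, |(PySem.List.pyGet? L (x >>> sh)).getD 0 - t| = d0) →
    (s.2.2 = true ∨ ¬ d0 < s.2.1) →
    l.foldl (pvStepA t L sh) s = s := by
  intro l
  induction l with
  | nil => intro s _ _; rfl
  | cons x xs ih =>
    intro s hmem hs
    have hx : |(PySem.List.pyGet? L (x >>> sh)).getD 0 - t| = d0 := hmem x (by simp)
    have hstep : pvStepA t L sh s x = s := by
      unfold pvStepA
      rcases hs with hdone | hlt
      · simp [hdone]
      · by_cases hd : s.2.2 = true
        · simp [hd]
        · simp only [Bool.not_eq_true] at hd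
          simp [hd, hx, hlt]
    simpa [List.foldl_cons, hstep] using ih s (fun y hy => hmem y (by simp [hy])) hs

-- A block (first candidate input of a level, followed by inputs hitting the same level) folds to one step.
lemma pv_block (t : Int) (L : List Int) (sh : Nat) (c : Int) (l : List Int)
    (hl : ∀ x ∈ l, x >>> sh = c >>> sh) (s : Int × Int × Bool) :
    (c :: l).foldl (pvStepA t L sh) s = pvStepA t L sh s c := by
  rw [List.foldl_cons]
  set d0 := |(PySem.List.pyGet? L (c >>> sh)).getD 0 - t| with hd0
  apply pv_noop t L sh d0
  · intro x hx; rw [hl x hx]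
  · unfold pvStepA
    by_cases hdone : s.2.2 = true
    · simp [hdone]
    · simp only [Bool.not_eq_true] at hdone
      by_cases hlt : d0 < s.2.1
      · simp [hdone, ← hd0, hlt]
      · simp [hdone, ← hd0, hlt]

-- flatMap of (first :: rest) blocks folds to a fold over the firsts
lemma pv_blocks_fold (t : Int) (L : List Int) (sh : Nat) :
    ∀ (bl : List (Int × List Int)) (s : Int × Int × Bool),
    (∀ p ∈ bl, ∀ x ∈ p.2, x >>> sh = p.1 >>> sh) →
    (bl.flatMap (fun p => p.1 :: p.2)).foldl (pvStepA t L sh) s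
      = (bl.map (·.1)).foldl (pvStepA t L sh) s := by
  intro bl
  induction bl with
  | nil => intro s _; rfl
  | cons p ps ih =>
    intro s hbl
    rw [List.flatMap_cons, List.foldl_append, pv_block t L sh p.1 p.2 (hbl p (by simp)),
        List.map_cons, List.foldl_cons]
    exact ih _ (fun q hq x hx => hbl q (by simp [hq]) x hx)

-- A's fold over the block-first inputs simulates B's fold over (index, level) pairs.
def pvShl (x : Int) (k : Nat) : Int := x <<< k

lemma pv_rel (t : Int) (L : List Int) (sh : Nat) :
    ∀ (pairs : List (Int × Int)) (i d : Int),
    (∀ p ∈ pairs, (PySem.List.pyGet? L (pvShl p.1 sh >>> sh)).getD 0 = p.2) →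
    (pairs.map (fun p => pvShl p.1 sh)).foldl (pvStepA t L sh) (pvShl i sh, d, decide (d = 0))
      = (pvShl (pairs.foldl (pvStepB t) (i, d)).1 sh,
         (pairs.foldl (pvStepB t) (i, d)).2,
         decide ((pairs.foldl (pvStepB t) (i, d)).2 = 0)) := by
  intro pairs
  induction pairs with
  | nil => intro i d _; rfl
  | cons p ps ih =>
    intro i d hmem
    have hp : (PySem.List.pyGet? L (pvShl p.1 sh >>> sh)).getD 0 = p.2 := hmem p (by simp)
    have hrest : ∀ q ∈ ps, (PySem.List.pyGet? L (pvShl q.1 sh >>> sh)).getD 0 = q.2 :=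
      fun q hq => hmem q (by simp [hq])
    rw [List.map_cons, List.foldl_cons, List.foldl_cons]
    have hstep : pvStepA t L sh (pvShl i sh, d, decide (d = 0)) (pvShl p.1 sh)
        = (pvShl (pvStepB t (i, d) p).1 sh, (pvStepB t (i, d) p).2,
           decide ((pvStepB t (i, d) p).2 = 0)) := by
      by_cases hd : d = 0
      · subst hd
        have hnb : ¬ |p.2 - t| < (0 : Int) := not_lt.mpr (abs_nonneg _)
        unfold pvStepA pvStepB
        simp [hnb]
      · unfold pvStepA pvStepB
        simp only [hd, decide_eq_true_eq, if_false, hp]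
        by_cases hlt : |p.2 - t| < d
        · simp [hlt]
        · simp [hlt, hd]
    rw [hstep]
    have := ih (pvStepB t (i, d) p).1 (pvStepB t (i, d) p).2 hrest
    simpa using this


-- channel lemma, 3 bits
set_option maxRecDepth 8192 in
lemma pv_comp3 (t : Int) :
    pvFindBestInput t [0,36,72,109,145,182,218,255] 3 = pvFindBestInputAlt t 3 := by
  unfold pvFindBestInput pvFindBestInputAlt
  have hlv : ((PySem.List.pyRange 0 ((1 <<< 3 : Int) - 1 + 1) 1).map
      (fun i => PySem.Int.floordiv (i * 255) ((1 <<< 3 : Int) - 1)))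
      = ([0,36,72,109,145,182,218,255] : List Int) := by decide
  have hsplit : PySem.List.pyRange 0 256 1
      = (([(0, PySem.List.pyRange 1 32 1), (32, PySem.List.pyRange 33 64 1),
          (64, PySem.List.pyRange 65 96 1), (96, PySem.List.pyRange 97 128 1),
          (128, PySem.List.pyRange 129 160 1), (160, PySem.List.pyRange 161 192 1),
          (192, PySem.List.pyRange 193 224 1), (224, PySem.List.pyRange 225 256 1)] :
          List (Int × List Int)).flatMap (fun p => p.1 :: p.2)) := by decide
  simp only [hlv, hsplit]
  rw [pv_blocks_fold t _ (8 - 3) _ _ (by decide)]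
  have hfirsts : (([(0, PySem.List.pyRange 1 32 1), (32, PySem.List.pyRange 33 64 1),
          (64, PySem.List.pyRange 65 96 1), (96, PySem.List.pyRange 97 128 1),
          (128, PySem.List.pyRange 129 160 1), (160, PySem.List.pyRange 161 192 1),
          (192, PySem.List.pyRange 193 224 1), (224, PySem.List.pyRange 225 256 1)] :
          List (Int × List Int)).map (·.1))
      = ((PySem.List.enumerate ([0,36,72,109,145,182,218,255] : List Int) 0).map
          (fun p => pvShl p.1 (8 - 3 : Nat))) := by decide
  rw [hfirsts]
  have hinit : ((0 : Int), (256 : Int), false)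
      = (pvShl 0 (8 - 3 : Nat), (256 : Int), decide ((256 : Int) = 0)) := by decide
  rw [hinit, pv_rel t _ (8 - 3) _ 0 256 (by decide)]
  rfl

-- channel lemma, 2 bits
set_option maxRecDepth 8192 in
lemma pv_comp2 (t : Int) :
    pvFindBestInput t [0,85,170,255] 2 = pvFindBestInputAlt t 2 := by
  unfold pvFindBestInput pvFindBestInputAlt
  have hlv : ((PySem.List.pyRange 0 ((1 <<< 2 : Int) - 1 + 1) 1).map
      (fun i => PySem.Int.floordiv (i * 255) ((1 <<< 2 : Int) - 1)))
      = ([0,85,170,255] : List Int) := by decide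
  have hsplit : PySem.List.pyRange 0 256 1
      = (([(0, PySem.List.pyRange 1 64 1), (64, PySem.List.pyRange 65 128 1),
          (128, PySem.List.pyRange 129 192 1), (192, PySem.List.pyRange 193 256 1)] :
          List (Int × List Int)).flatMap (fun p => p.1 :: p.2)) := by decide
  simp only [hlv, hsplit]
  rw [pv_blocks_fold t _ (8 - 2) _ _ (by decide)]
  have hfirsts : (([(0, PySem.List.pyRange 1 64 1), (64, PySem.List.pyRange 65 128 1),
          (128, PySem.List.pyRange 129 192 1), (192, PySem.List.pyRange 193 256 1)] :
          List (Int × List Int)).map (·.1))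
      = ((PySem.List.enumerate ([0,85,170,255] : List Int) 0).map
          (fun p => pvShl p.1 (8 - 2 : Nat))) := by decide
  rw [hfirsts]
  have hinit : ((0 : Int), (256 : Int), false)
      = (pvShl 0 (8 - 2 : Nat), (256 : Int), decide ((256 : Int) = 0)) := by decide
  rw [hinit, pv_rel t _ (8 - 2) _ 0 256 (by decide)]
  rfl

-- ===== VERDICT (by name: the statement is the Claim_ definition above) =====
theorem compensate_pixel_spec : Claim_equal_compensate_pixel := by
  intro r g b _
  unfold Spec_compensate_pixel compensate_pixel compensate_pixel_alt
  have h7 : ((PySem.List.pyRange 0 8 1).map (fun i => PySem.Int.floordiv (i * 255) 7))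
      = ([0,36,72,109,145,182,218,255] : List Int) := by decide
  have h3 : ((PySem.List.pyRange 0 4 1).map (fun i => PySem.Int.floordiv (i * 255) 3))
      = ([0,85,170,255] : List Int) := by decide
  simp only [h7, h3, pv_comp3, pv_comp2]
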